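-- pv_equiv track=rewrite | github.com/lacattano/AI-Playwright-Test-Generator | src/llm_client.py | normalise_code_newlines
-- ===== SOURCE A (Python) =====
-- def normalise_code_newlines(code: str) -> str:
--     """Normalizes line endings in generated test code.
--
--     Simple cleanup: remove extra whitespace and ensure proper line endings.
--     Do NOT try to add newlines aggressively as this can break multi-line statements.
--
--     Args:
--         code: The raw generated code.
--
--     Returns:
--         Code with basic cleanup applied.
--     """
--     if not code or not code.strip():
--         return code.strip()
--
--     # Only do minimal cleanup: normalize line endings and remove trailing spaces
--     lines = code.split("\n")
--     cleaned_lines = [line.rstrip() for line in lines]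
--     # Remove empty lines at start and end
--     while cleaned_lines and not cleaned_lines[0].strip():
--         cleaned_lines.pop(0)
--     while cleaned_lines and not cleaned_lines[-1].strip():
--         cleaned_lines.pop()
--
--     return "\n".join(cleaned_lines)
-- ===== SOURCE B (Python) =====
-- def normalise_code_newlines(code: str) -> str:
--     """Same cleanup as A: rstrip each line, then drop blank edge lines via strip('\n')."""
--     return "\n".join(line.rstrip() for line in code.split("\n")).strip("\n")
-- ===== Notes on version B (the rewrite author's own statement) =====
-- stated objective: simpler
-- what changed: Replaced the guard and the two while-pop loops that trim blank edge lines with a single strip('\n') on the joined result, collapsing the function to one expression.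
import Mathlib
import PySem

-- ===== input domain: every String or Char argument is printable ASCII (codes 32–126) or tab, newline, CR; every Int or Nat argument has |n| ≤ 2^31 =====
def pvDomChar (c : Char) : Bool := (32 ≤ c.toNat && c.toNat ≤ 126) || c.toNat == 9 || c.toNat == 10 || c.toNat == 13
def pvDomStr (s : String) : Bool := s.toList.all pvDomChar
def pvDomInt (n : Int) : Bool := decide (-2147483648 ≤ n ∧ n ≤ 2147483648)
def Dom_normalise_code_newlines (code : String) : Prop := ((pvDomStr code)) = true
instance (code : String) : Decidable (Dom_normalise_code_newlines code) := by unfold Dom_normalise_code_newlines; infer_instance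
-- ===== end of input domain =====

-- B replaces A's guard and the two while-pop loops that trim blank edge lines by one strip("\n") on the joined result (objective: simpler).

-- ===== PORT A =====
-- while cleaned_lines and not cleaned_lines[0].strip(): cleaned_lines.pop(0)
def pvTrimFront (ls : List (List Char)) : List (List Char) :=
  match ls with
  | [] => []
  | l :: rest => if PySem.Chars.strip l = [] then pvTrimFront rest else l :: rest

-- while cleaned_lines and not cleaned_lines[-1].strip(): cleaned_lines.pop()
def pvTrimBack (ls : List (List Char)) : List (List Char) :=
  match _h : ls.getLast? with
  | none => []
  | some l => if PySem.Chars.strip l = [] then pvTrimBack ls.dropLast else ls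
termination_by ls.length
decreasing_by
  have hne : ls ≠ [] := by intro hnil; subst hnil; simp at _h
  have hpos : 0 < ls.length := List.length_pos_iff.mpr hne
  simp [List.length_dropLast]
  omega

def normalise_code_newlines (code : String) : String :=
  if code == "" || PySem.Str.strip code == "" then PySem.Str.strip code
  else
    let lines := PySem.Chars.splitOn code.toList ['\n']
    let cleaned_lines := lines.map PySem.Chars.rstrip
    let cleaned_lines := pvTrimFront cleaned_lines
    let cleaned_lines := pvTrimBack cleaned_lines
    String.ofList (PySem.Chars.join ['\n'] cleaned_lines)

-- ===== PORT B =====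
def normalise_code_newlines_alt (code : String) : String :=
  String.ofList (PySem.Chars.stripChars
    (PySem.Chars.join ['\n'] ((PySem.Chars.splitOn code.toList ['\n']).map PySem.Chars.rstrip))
    ['\n'])

-- ===== PRECONDITION & SPEC =====
def Spec_normalise_code_newlines (code : String) (out : String) : Prop := out = normalise_code_newlines_alt code
instance (code : String) (out : String) : Decidable (Spec_normalise_code_newlines code out) := by unfold Spec_normalise_code_newlines; infer_instance

-- ===== CLAIM (what is proved, stated in full; the proofs are below) =====
def Claim_equal_normalise_code_newlines : Prop := ∀ (code : String), Dom_normalise_code_newlines code → Spec_normalise_code_newlines code (normalise_code_newlines code)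

-- ===== LEMMAS AND PROOFS =====

-- structural model of code.split("\n")
def pvSplits (s : List Char) : List (List Char) :=
  match s with
  | [] => [[]]
  | c :: rest => if c = '\n' then [] :: pvSplits rest else (pvSplits rest).modifyHead (c :: ·)

theorem pvSplits_ne_nil (s : List Char) : pvSplits s ≠ [] := by
  induction s with
  | nil => simp [pvSplits]
  | cons c rest ih =>
    simp only [pvSplits]
    split
    · simp
    · cases h : pvSplits rest with
      | nil => exact absurd h ih
      | cons a t => simp [List.modifyHead]

theorem splitOn_go_acc (sep : List Char) (fuel : Nat) (l cur : List Char)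
    (acc : List (List Char)) :
    PySem.Chars.splitOn.go sep fuel l cur acc =
      acc.reverse ++ PySem.Chars.splitOn.go sep fuel l cur [] := by
  induction fuel generalizing l cur acc with
  | zero => simp [PySem.Chars.splitOn.go]
  | succ f ih =>
    cases l with
    | nil => simp [PySem.Chars.splitOn.go]
    | cons c rest =>
      simp only [PySem.Chars.splitOn.go]
      split
      · rw [ih (List.drop sep.length (c :: rest)) [] (cur.reverse :: acc),
          ih (List.drop sep.length (c :: rest)) [] [cur.reverse]]
        simp
      · exact ih rest (c :: cur) acc

theorem splitOn_go_spec (l : List Char) (fuel : Nat) (cur : List Char)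
    (h : l.length ≤ fuel) :
    PySem.Chars.splitOn.go ['\n'] fuel l cur [] =
      (pvSplits l).modifyHead (cur.reverse ++ ·) := by
  induction l generalizing fuel cur with
  | nil =>
    cases fuel <;> simp [PySem.Chars.splitOn.go, pvSplits, List.modifyHead]
  | cons c rest ih =>
    cases fuel with
    | zero => simp at h
    | succ f =>
      simp only [PySem.Chars.splitOn.go]
      have hf : rest.length ≤ f := by simp at h; omega
      split
      · rename_i hpre
        have hc : c = '\n' := by
          cases hpre' : List.isPrefixOf ['\n'] (c :: rest) with
          | false => rw [hpre'] at hpre; cases hpre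
          | true =>
            have := (List.isPrefixOf_iff_prefix).mp hpre'
            rcases this with ⟨t, ht⟩
            simp at ht
            exact ht.1.symm
        subst hc
        rw [splitOn_go_acc]
        simp only [List.length_cons, List.length_nil, List.drop_succ_cons, List.drop_zero]
        rw [ih f [] hf]
        simp only [pvSplits, List.reverse_nil, List.reverse_cons,
          List.nil_append, List.cons_append]
        cases pvSplits rest <;> simp
      · rename_i hpre
        have hc : ¬ c = '\n' := by
          intro hc; subst hc
          exact hpre (by simp)
        rw [ih f (c :: cur) hf]
        simp only [pvSplits, if_neg hc]
        cases hsp : pvSplits rest with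
        | nil => exact absurd hsp (pvSplits_ne_nil rest)
        | cons a t => simp [List.modifyHead]

theorem splitOn_eq_pvSplits (s : List Char) :
    PySem.Chars.splitOn s ['\n'] = pvSplits s := by
  show PySem.Chars.splitOn.go ['\n'] (s.length + 1) s [] [] = pvSplits s
  rw [splitOn_go_spec s (s.length + 1) [] (by omega)]
  cases h : pvSplits s with
  | nil => exact absurd h (pvSplits_ne_nil s)
  | cons a t => simp [List.modifyHead]

theorem pvSplits_no_nl (s : List Char) : ∀ l ∈ pvSplits s, '\n' ∉ l := by
  induction s with
  | nil => simp [pvSplits]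
  | cons c rest ih =>
    intro l hl
    simp only [pvSplits] at hl
    by_cases hc : c = '\n'
    · rw [if_pos hc] at hl
      rcases List.mem_cons.mp hl with rfl | hl
      · simp
      · exact ih l hl
    · rw [if_neg hc] at hl
      cases h : pvSplits rest with
      | nil => exact absurd h (pvSplits_ne_nil rest)
      | cons a t =>
        rw [h] at hl
        simp only [List.modifyHead] at hl
        rcases List.mem_cons.mp hl with rfl | hl
        · intro hmem
          rcases List.mem_cons.mp hmem with h1 | h1
          · exact hc h1.symm
          · exact ih a (h ▸ List.mem_cons_self) h1
        · exact ih l (h ▸ List.mem_cons_of_mem _ hl)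

theorem all_isspace_pvSplits (s : List Char) (h : s.all PySem.Chars.isspace) :
    ∀ l ∈ pvSplits s, l.all PySem.Chars.isspace := by
  induction s with
  | nil => simp [pvSplits]
  | cons c rest ih =>
    simp only [List.all_cons, Bool.and_eq_true] at h
    intro l hl
    simp only [pvSplits] at hl
    by_cases hc : c = '\n'
    · rw [if_pos hc] at hl
      rcases List.mem_cons.mp hl with rfl | hl
      · simp
      · exact ih h.2 l hl
    · rw [if_neg hc] at hl
      cases hsp : pvSplits rest with
      | nil => exact absurd hsp (pvSplits_ne_nil rest)
      | cons a t =>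
        rw [hsp] at hl
        simp only [List.modifyHead] at hl
        rcases List.mem_cons.mp hl with rfl | hl
        · simp only [List.all_cons, Bool.and_eq_true]
          exact ⟨h.1, ih h.2 a (hsp ▸ List.mem_cons_self)⟩
        · exact ih h.2 l (hsp ▸ List.mem_cons_of_mem _ hl)

-- whitespace lemmas
theorem rstrip_eq_nil_iff (l : List Char) :
    PySem.Chars.rstrip l = [] ↔ l.all PySem.Chars.isspace := by
  simp only [PySem.Chars.rstrip, List.reverse_eq_nil_iff, List.dropWhile_eq_nil_iff,
    List.all_eq_true, List.mem_reverse]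

theorem strip_eq_nil_iff (l : List Char) :
    PySem.Chars.strip l = [] ↔ l.all PySem.Chars.isspace := by
  simp only [PySem.Chars.strip, rstrip_eq_nil_iff, PySem.Chars.lstrip]
  constructor
  · intro h
    have := List.takeWhile_append_dropWhile (p := PySem.Chars.isspace) (l := l)
    rw [← this, List.all_append, h]
    simp only [Bool.and_eq_true, List.all_eq_true]
    exact ⟨fun x hx => List.mem_takeWhile_imp hx, by simp⟩
  · intro h
    simp only [List.all_eq_true] at h ⊢
    intro x hx
    exact h x (List.Sublist.mem hx (List.dropWhile_sublist _))

theorem dropWhile_idem {α : Type} (p : α → Bool) (l : List α) :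
    List.dropWhile p (List.dropWhile p l) = List.dropWhile p l := by
  induction l with
  | nil => rfl
  | cons a t ih =>
    rw [List.dropWhile_cons]
    split
    · exact ih
    · rename_i hp
      rw [List.dropWhile_cons, if_neg hp]

theorem rstrip_idem (l : List Char) :
    PySem.Chars.rstrip (PySem.Chars.rstrip l) = PySem.Chars.rstrip l := by
  simp only [PySem.Chars.rstrip, List.reverse_reverse, dropWhile_idem]

theorem strip_rstrip_nil_iff (l : List Char) :
    PySem.Chars.strip (PySem.Chars.rstrip l) = [] ↔ PySem.Chars.rstrip l = [] := by
  constructor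
  · intro h
    have h2 := (strip_eq_nil_iff _).mp h
    have h3 := (rstrip_eq_nil_iff (PySem.Chars.rstrip l)).mpr h2
    rwa [rstrip_idem] at h3
  · intro h
    rw [h]
    simp [PySem.Chars.strip, PySem.Chars.lstrip, PySem.Chars.rstrip]

theorem mem_rstrip (l : List Char) (c : Char) (h : c ∈ PySem.Chars.rstrip l) : c ∈ l := by
  simp only [PySem.Chars.rstrip, List.mem_reverse] at h
  exact List.mem_reverse.mp (List.Sublist.mem h (List.dropWhile_sublist _))

theorem dropWhile_congr_mem {α : Type} (p q : α → Bool) (l : List α)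
    (h : ∀ x ∈ l, p x = q x) : l.dropWhile p = l.dropWhile q := by
  induction l with
  | nil => rfl
  | cons a t ih =>
    rw [List.dropWhile_cons, List.dropWhile_cons, h a List.mem_cons_self]
    split
    · exact ih (fun x hx => h x (List.mem_cons_of_mem _ hx))
    · rfl


-- join/dropWhile lemmas
theorem join_append_singleton (ls : List (List Char)) (a : List Char) (h : ls ≠ []) :
    PySem.Chars.join ['\n'] (ls ++ [a]) = PySem.Chars.join ['\n'] ls ++ '\n' :: a := by
  induction ls with
  | nil => exact absurd rfl h
  | cons b t ih =>
    cases t with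
    | nil =>
      show PySem.Chars.join ['\n'] [b, a] = _
      rw [PySem.Chars.join_cons_cons, PySem.Chars.join_singleton, PySem.Chars.join_singleton]
      simp
    | cons b' t' =>
      have ih' := ih (by simp)
      show PySem.Chars.join ['\n'] (b :: ((b' :: t') ++ [a])) = _
      rw [show (b' :: t') ++ [a] = b' :: (t' ++ [a]) from rfl]
      rw [PySem.Chars.join_cons_cons, PySem.Chars.join_cons_cons]
      rw [show (b' :: (t' ++ [a])) = (b' :: t') ++ [a] from rfl, ih']
      simp [List.append_assoc]

theorem reverse_join (ls : List (List Char)) :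
    (PySem.Chars.join ['\n'] ls).reverse =
      PySem.Chars.join ['\n'] (ls.reverse.map List.reverse) := by
  induction ls with
  | nil => simp [PySem.Chars.join_nil]
  | cons a t ih =>
    cases t with
    | nil => simp [PySem.Chars.join_singleton]
    | cons b t' =>
      calc (PySem.Chars.join ['\n'] (a :: b :: t')).reverse
          = (PySem.Chars.join ['\n'] (b :: t')).reverse ++ '\n' :: a.reverse := by
            rw [PySem.Chars.join_cons_cons]; simp
        _ = PySem.Chars.join ['\n'] ((b :: t').reverse.map List.reverse) ++ '\n' :: a.reverse := by
            rw [ih]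
        _ = PySem.Chars.join ['\n'] (((b :: t').reverse.map List.reverse) ++ [a.reverse]) :=
            (join_append_singleton _ _ (by simp)).symm
        _ = PySem.Chars.join ['\n'] ((a :: b :: t').reverse.map List.reverse) := by
            simp

theorem dropWhile_join (ls : List (List Char)) (h : ∀ l ∈ ls, '\n' ∉ l) :
    List.dropWhile (· == '\n') (PySem.Chars.join ['\n'] ls) =
      PySem.Chars.join ['\n'] (ls.dropWhile List.isEmpty) := by
  induction ls with
  | nil => simp [PySem.Chars.join_nil]
  | cons a t ih =>
    cases t with
    | nil =>
      rw [PySem.Chars.join_singleton]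
      cases a with
      | nil => simp [PySem.Chars.join_nil]
      | cons c cs =>
        have hc : ¬ c = '\n' := fun hc => h _ List.mem_cons_self (hc ▸ List.mem_cons_self)
        rw [List.dropWhile_cons, if_neg (by simp [hc])]
        simp [PySem.Chars.join_singleton, List.isEmpty]
    | cons b t' =>
      rw [PySem.Chars.join_cons_cons]
      cases a with
      | nil =>
        simp only [List.nil_append, List.singleton_append, List.dropWhile_cons]
        rw [if_pos (by simp)]
        rw [ih (fun l hl => h l (List.mem_cons_of_mem _ hl))]
        simp [List.dropWhile_cons, List.isEmpty]
      | cons c cs =>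
        have hc : ¬ c = '\n' := fun hc => h _ List.mem_cons_self (hc ▸ List.mem_cons_self)
        rw [List.cons_append, List.cons_append, List.dropWhile_cons, if_neg (by simp [hc])]
        rw [List.dropWhile_cons, if_neg (by simp [List.isEmpty])]
        rw [PySem.Chars.join_cons_cons]
        simp

theorem stripChars_join (ls : List (List Char)) (h : ∀ l ∈ ls, '\n' ∉ l) :
    PySem.Chars.stripChars (PySem.Chars.join ['\n'] ls) ['\n'] =
      PySem.Chars.join ['\n']
        (((ls.dropWhile List.isEmpty).reverse.dropWhile List.isEmpty).reverse) := by
  have hp : (fun c => List.contains ['\n'] c) = (fun c => c == '\n') := by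
    funext c
    by_cases hc : c = '\n' <;> simp [hc]
  simp only [PySem.Chars.stripChars, hp]
  rw [dropWhile_join ls h]
  set ls1 := ls.dropWhile List.isEmpty with hls1
  have h1 : ∀ l ∈ ls1, '\n' ∉ l :=
    fun l hl => h l (List.Sublist.mem hl (List.dropWhile_sublist _))
  rw [reverse_join ls1]
  have h2 : ∀ l ∈ ls1.reverse.map List.reverse, '\n' ∉ l := by
    intro l hl
    simp only [List.mem_map, List.mem_reverse] at hl
    rcases hl with ⟨x, hx, rfl⟩
    simp only [List.mem_reverse]
    exact h1 x hx
  rw [dropWhile_join _ h2]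
  have h3 : (ls1.reverse.map List.reverse).dropWhile List.isEmpty =
      (ls1.reverse.dropWhile List.isEmpty).map List.reverse := by
    rw [List.dropWhile_map]
    exact congrArg _ (dropWhile_congr_mem _ _ _ (fun x _ => by simp))
  rw [h3, reverse_join]
  congr 1
  simp [List.map_map]

-- trim-loop shapes
theorem pvTrimFront_eq (ls : List (List Char)) :
    pvTrimFront ls = ls.dropWhile (fun l => decide (PySem.Chars.strip l = [])) := by
  induction ls with
  | nil => simp [pvTrimFront]
  | cons l rest ih =>
    simp only [pvTrimFront, List.dropWhile_cons]
    by_cases hl : PySem.Chars.strip l = []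
    · rw [if_pos hl, if_pos (by simp [hl]), ih]
    · rw [if_neg hl, if_neg (by simp [hl])]

theorem pvTrimBack_eq (ls : List (List Char)) :
    pvTrimBack ls = (ls.reverse.dropWhile (fun l => decide (PySem.Chars.strip l = []))).reverse := by
  induction hn : ls.length using Nat.strong_induction_on generalizing ls with
  | _ n ih =>
    unfold pvTrimBack
    split
    · rename_i h
      have : ls = [] := List.getLast?_eq_none_iff.mp h
      subst this; simp
    · rename_i l h
      obtain ⟨ys, rfl⟩ := List.getLast?_eq_some_iff.mp h
      have hdrop : (ys ++ [l]).dropLast = ys := by simp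
      have hrev : (ys ++ [l]).reverse = l :: ys.reverse := by simp
      by_cases hl : PySem.Chars.strip l = []
      · rw [if_pos hl, hdrop]
        rw [ih ys.length (by simp only [List.length_append, List.length_cons, List.length_nil] at hn; omega) ys rfl]
        rw [hrev, List.dropWhile_cons, if_pos (by simp [hl])]
      · rw [if_neg hl, hrev, List.dropWhile_cons, if_neg (by simp [hl])]
        simp

-- ===== VERDICT (by name: the statement is the Claim_ definition above) =====
theorem decide_nil_eq_isEmpty (l : List Char) : (decide (l = []) : Bool) = l.isEmpty := by
  cases l <;> simp

theorem ofList_eq_nil_iff (cs : List Char) : String.ofList cs = "" ↔ cs = [] := by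
  constructor
  · intro h
    have := congrArg String.toList h
    rwa [String.toList_ofList] at this
  · intro h; rw [h]

theorem normalise_code_newlines_spec : Claim_equal_normalise_code_newlines := by
  intro code _
  unfold Spec_normalise_code_newlines
  simp only [normalise_code_newlines, normalise_code_newlines_alt, splitOn_eq_pvSplits]
  set cleaned := (pvSplits code.toList).map PySem.Chars.rstrip with hcl
  have hnl : ∀ l ∈ cleaned, '\n' ∉ l := by
    intro l hl
    rcases List.mem_map.mp hl with ⟨x, hx, rfl⟩
    intro hmem
    exact pvSplits_no_nl code.toList x hx (mem_rstrip x '\n' hmem)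
  have halt : PySem.Chars.stripChars (PySem.Chars.join ['\n'] cleaned) ['\n'] =
      PySem.Chars.join ['\n']
        (((cleaned.dropWhile List.isEmpty).reverse.dropWhile List.isEmpty).reverse) :=
    stripChars_join cleaned hnl
  have key : ∀ x ∈ cleaned, (decide (PySem.Chars.strip x = []) : Bool) = x.isEmpty := by
    intro x hx
    rcases List.mem_map.mp hx with ⟨y, hy, rfl⟩
    rw [decide_eq_decide.mpr (strip_rstrip_nil_iff y)]
    exact decide_nil_eq_isEmpty _
  split
  · rename_i hguard
    have hstrip : PySem.Chars.strip code.toList = [] := by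
      cases hb : (code == "") with
      | true =>
        have : code = "" := beq_iff_eq.mp hb
        subst this; rfl
      | false =>
        rw [hb, Bool.false_or] at hguard
        have : PySem.Str.strip code = "" := beq_iff_eq.mp hguard
        simp only [PySem.Str.strip] at this
        exact (ofList_eq_nil_iff _).mp this
    have hall := (strip_eq_nil_iff code.toList).mp hstrip
    have hempty : ∀ l ∈ cleaned, l.isEmpty := by
      intro l hl
      rcases List.mem_map.mp hl with ⟨x, hx, rfl⟩
      have h0 := (rstrip_eq_nil_iff x).mpr (all_isspace_pvSplits code.toList hall x hx)
      simp [h0]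
    have hdw : cleaned.dropWhile List.isEmpty = [] := List.dropWhile_eq_nil_iff.mpr hempty
    rw [halt, hdw]
    simp only [List.reverse_nil, List.dropWhile_nil, PySem.Chars.join_nil]
    simp only [PySem.Str.strip, hstrip]
  · rw [pvTrimFront_eq, pvTrimBack_eq]
    rw [dropWhile_congr_mem _ _ cleaned key]
    have key2 : ∀ x ∈ (cleaned.dropWhile List.isEmpty).reverse,
        (decide (PySem.Chars.strip x = []) : Bool) = x.isEmpty := by
      intro x hx
      exact key x (List.Sublist.mem (List.mem_reverse.mp hx) (List.dropWhile_sublist _))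
    rw [dropWhile_congr_mem _ _ _ key2]
    rw [halt]
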